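-- pv_equiv track=rewrite | github.com/zyy20009619/Evaluator | object_oriented_measurement/class_metric_compete.py | _invocation
-- ===== SOURCE A (Python) =====
-- def _invocation(method_id, explored, invoke_local_methods):
--     if method_id not in invoke_local_methods:
--        return explored
--
--     next_invocations = list()
--     for called_id in invoke_local_methods[method_id]:
--         if called_id not in explored and method_id != called_id:
--             next_invocations.append(called_id)
--     if len(next_invocations) > 0:
--         explored[method_id] = next_invocations
--         for next_invocation in next_invocations:
--             _invocation(next_invocation, explored, invoke_local_methods)
--     return explored
-- ===== SOURCE B (Python) =====
-- def _invocation(method_id, explored, invoke_local_methods):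
--     # Iterative explicit-stack DFS; mutates `explored` in place like the original.
--     stack = [method_id]
--     while stack:
--         node = stack.pop()
--         if node not in invoke_local_methods:
--             continue
--         nxt = [c for c in invoke_local_methods[node]
--                if c not in explored and node != c]
--         if nxt:
--             explored[node] = nxt
--             stack.extend(reversed(nxt))
--     return explored
-- ===== Notes on version B (the rewrite author's own statement) =====
-- stated objective: alternative
-- what changed: Replaces A's self-recursive pre-order exploration by an iterative DFS with an explicit stack (pop a node, filter its not-yet-explored callees against the live explored dict, record them, push them reversed), producing the identical explored dict without using the call stack.
import Mathlib
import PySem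

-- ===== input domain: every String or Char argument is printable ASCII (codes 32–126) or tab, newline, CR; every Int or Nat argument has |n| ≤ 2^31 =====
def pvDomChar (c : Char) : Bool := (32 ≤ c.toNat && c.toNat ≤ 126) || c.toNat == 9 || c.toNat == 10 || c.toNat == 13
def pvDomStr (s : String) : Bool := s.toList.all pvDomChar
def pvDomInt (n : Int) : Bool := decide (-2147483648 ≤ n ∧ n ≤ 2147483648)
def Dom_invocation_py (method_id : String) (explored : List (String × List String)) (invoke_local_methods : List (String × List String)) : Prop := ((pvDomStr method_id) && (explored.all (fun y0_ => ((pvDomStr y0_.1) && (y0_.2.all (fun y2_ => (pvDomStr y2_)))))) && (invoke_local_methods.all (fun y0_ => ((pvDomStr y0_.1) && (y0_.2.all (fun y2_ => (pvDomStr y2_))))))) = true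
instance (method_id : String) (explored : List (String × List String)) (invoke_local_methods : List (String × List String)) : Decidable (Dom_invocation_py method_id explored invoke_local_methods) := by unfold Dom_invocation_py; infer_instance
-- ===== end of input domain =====

-- B replaces A's recursion by an explicit-stack iterative DFS (same pre-order, same dict);
-- both A and B mutate `explored` in place in Python — the equivalence proved here is about the
-- returned dict's items (A and B perform the same sequence of assignments, so mutation agrees too).

-- ===== PORT A =====
-- Termination infrastructure for PORT A (cited in its `decreasing_by`):
-- pvU counts invoke-keys not yet in explored; pvW/pvSumW is a per-node potential.
def pvMono (E E' : PySem.Dict String (List String)) : Prop :=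
  ∀ k, E.contains k = true → E'.contains k = true

def pvBnd (inv E E' : PySem.Dict String (List String)) : Prop :=
  ∀ k, E'.contains k = true → E.contains k = true ∨ inv.contains k = true

def pvNxt (inv E : PySem.Dict String (List String)) (n : String) : List String :=
  ((inv.get? n).getD []).filter (fun c => !(E.contains c) && (n != c))

def pvU (inv E : PySem.Dict String (List String)) : Nat :=
  List.countP (fun k => !(E.contains k)) inv.keys

def pvW (inv E : PySem.Dict String (List String)) (n : String) : Nat :=
  if E.contains n = true then 1 + (pvNxt inv E n).length else 1

def pvSumW (inv E : PySem.Dict String (List String)) (cs : List String) : Nat :=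
  (cs.map (pvW inv E)).sum

lemma pv_countP_lt {α : Type} (p q : α → Bool) {l : List α}
    (h : ∀ x ∈ l, p x = true → q x = true) {a : α} (ha : a ∈ l)
    (hq : q a = true) (hp : p a = false) : l.countP p < l.countP q := by
  induction l with
  | nil => cases ha
  | cons x xs ih =>
    rw [List.countP_cons, List.countP_cons]
    rcases List.mem_cons.1 ha with rfl | ha'
    · have hle : xs.countP p ≤ xs.countP q :=
        List.countP_mono_left (fun y hy => h y (List.mem_cons_of_mem _ hy))
      rw [hp, hq, if_neg (by simp), if_pos rfl]; omega
    · have hlt := ih (fun y hy => h y (List.mem_cons_of_mem _ hy)) ha'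
      have : (if p x = true then 1 else 0) ≤ (if q x = true then 1 else 0) := by
        by_cases hx : p x = true
        · rw [if_pos hx, if_pos (h x (List.mem_cons_self) hx)]
        · rw [if_neg hx]; omega
      omega

lemma pv_countP_rev {α : Type} (p q : α → Bool) {l : List α}
    (h : ∀ x ∈ l, p x = true → q x = true) (hc : l.countP q ≤ l.countP p) :
    ∀ x ∈ l, q x = true → p x = true := by
  intro x hx hq
  by_contra hp
  have hp' : p x = false := by simpa using hp
  exact absurd (pv_countP_lt p q h hx hq hp') (by omega)

lemma pvW_pos (inv E : PySem.Dict String (List String)) (n : String) : 1 ≤ pvW inv E n := by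
  unfold pvW; split <;> omega

lemma pvSumW_cons (inv E : PySem.Dict String (List String)) (c : String) (cs : List String) :
    pvSumW inv E (c :: cs) = pvW inv E c + pvSumW inv E cs := by
  simp [pvSumW]

lemma pvU_mono (inv : PySem.Dict String (List String)) {E E' : PySem.Dict String (List String)}
    (h : pvMono E E') : pvU inv E' ≤ pvU inv E := by
  refine List.countP_mono_left ?_
  intro x _ hp
  have h1 : E'.contains x = false := by simpa using hp
  have h2 : E.contains x = false := by
    cases h2 : E.contains x
    · rfl
    · exact absurd (h x h2) (by simp [h1])
  simpa using h2

lemma pv_contains_eq_of_u_eq (inv : PySem.Dict String (List String))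
    {E E' : PySem.Dict String (List String)} (hm : pvMono E E') (hb : pvBnd inv E E')
    (hu : pvU inv E' = pvU inv E) (k : String) : E'.contains k = E.contains k := by
  cases hE : E.contains k
  · cases hI : inv.contains k
    · cases hE' : E'.contains k
      · rfl
      · rcases hb k hE' with h | h
        · rw [hE] at h; cases h
        · rw [hI] at h; cases h
    · have himp : ∀ x ∈ inv.keys, (!(E'.contains x)) = true → (!(E.contains x)) = true := by
        intro x _ hp
        have h1 : E'.contains x = false := by simpa using hp
        have h2 : E.contains x = false := by
          cases h2 : E.contains x
          · rfl
          · exact absurd (hm x h2) (by simp [h1])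
        simpa using h2
      have := pv_countP_rev _ _ himp (le_of_eq hu.symm) k
        ((PySem.Dict.contains_iff_mem_keys inv k).1 hI) (by simp [hE])
      simpa using this
  · exact hm k hE

lemma pv_contains_of_get?_some {inv : PySem.Dict String (List String)} {n : String}
    {ch : List String} (h : inv.get? n = some ch) : inv.contains n = true := by
  cases hc : inv.contains n
  · rw [(PySem.Dict.get?_eq_none_iff_contains inv n).mpr hc] at h; cases h
  · rfl

lemma pvU_insert_of_contains (inv : PySem.Dict String (List String))
    {E : PySem.Dict String (List String)} {n : String} (h : E.contains n = true)
    (v : List String) : pvU inv (E.insert n v) = pvU inv E := by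
  refine List.countP_congr ?_
  intro x _
  rw [PySem.Dict.contains_insert]
  cases hxn : x == n
  · simp
  · have : x = n := eq_of_beq hxn
    subst this
    simp [h]

lemma pvU_insert_lt (inv : PySem.Dict String (List String))
    {E : PySem.Dict String (List String)} {n : String} (hI : inv.contains n = true)
    (hE : E.contains n = false) (v : List String) :
    pvU inv (E.insert n v) < pvU inv E := by
  refine pv_countP_lt _ _ ?_ ((PySem.Dict.contains_iff_mem_keys inv n).1 hI) (by simp [hE]) ?_
  · intro x _ hp
    rw [PySem.Dict.contains_insert] at hp
    simp only [Bool.not_eq_true', Bool.or_eq_false_iff] at hp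
    simp [hp.2]
  · rw [PySem.Dict.contains_insert]
    simp

lemma pvW_congr (inv : PySem.Dict String (List String)) {E E' : PySem.Dict String (List String)}
    (h : ∀ k, E'.contains k = E.contains k) : pvW inv E' = pvW inv E := by
  funext n
  simp only [pvW, pvNxt, h]

lemma pvSumW_congr (inv : PySem.Dict String (List String)) {E E' : PySem.Dict String (List String)}
    (h : ∀ k, E'.contains k = E.contains k) (cs : List String) :
    pvSumW inv E' cs = pvSumW inv E cs := by
  unfold pvSumW
  rw [pvW_congr inv h]

lemma pv_sum_ones {f : String → Nat} : ∀ {cs : List String}, (∀ c ∈ cs, f c = 1) →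
    (cs.map f).sum = cs.length := by
  intro cs
  induction cs with
  | nil => intro _; rfl
  | cons x xs ih =>
    intro h
    rw [List.map_cons, List.sum_cons, h x List.mem_cons_self,
      ih (fun c hc => h c (List.mem_cons_of_mem _ hc)), List.length_cons]
    omega

lemma pv_beq_symm_false {n c : String} (h : (n == c) = false) : (c == n) = false := by
  cases hc : c == n
  · rfl
  · have : c = n := eq_of_beq hc
    subst this
    simp at h

lemma pv_filter_mem {E : PySem.Dict String (List String)} {n c : String} {ch : List String}
    (hc : c ∈ ch.filter (fun c => !(E.contains c) && (n != c))) :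
    E.contains c = false ∧ (c == n) = false := by
  have := (List.mem_filter.1 hc).2
  simp only [bne, Bool.and_eq_true, Bool.not_eq_true'] at this
  exact ⟨this.1, pv_beq_symm_false this.2⟩

lemma pvW_insert_one {inv E : PySem.Dict String (List String)} {n c : String}
    (hc : E.contains c = false) (hcn : (c == n) = false) (v : List String) :
    pvW inv (E.insert n v) c = 1 := by
  unfold pvW
  rw [PySem.Dict.contains_insert, hcn, hc]
  simp

lemma pvSumW_filter_insert (inv E : PySem.Dict String (List String)) (n : String)
    (ch : List String) (v : List String) :
    pvSumW inv (E.insert n v) (ch.filter (fun c => !(E.contains c) && (n != c)))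
      = (ch.filter (fun c => !(E.contains c) && (n != c))).length := by
  refine pv_sum_ones ?_
  intro c hc
  obtain ⟨h1, h2⟩ := pv_filter_mem hc
  exact pvW_insert_one h1 h2 v

lemma pvNxt_eq {inv E : PySem.Dict String (List String)} {n : String} {ch : List String}
    (h : inv.get? n = some ch) :
    pvNxt inv E n = ch.filter (fun c => !(E.contains c) && (n != c)) := by
  unfold pvNxt
  rw [h]
  rfl

-- Port of A's `_invocation` (CPS on the state: Python mutates `explored` in place; here the
-- dict is threaded through the recursion, which is the same sequence of updates).
-- `invAPNode` is the function itself; `invAPList` is its `for next_invocation in …` loop.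
-- The subtype result carries the two invariants (explored only grows; new keys are invoke-keys)
-- that the termination argument needs; the computed dict is the `.val`.
mutual
def invAPNode (inv : PySem.Dict String (List String)) (n : String)
    (E : PySem.Dict String (List String)) :
    {E' : PySem.Dict String (List String) // pvMono E E' ∧ pvBnd inv E E'} :=
  match hg : inv.get? n with
  | none => ⟨E, fun _ h => h, fun _ h => Or.inl h⟩
  | some children =>
    if hnx : 0 < (children.filter (fun c => !(E.contains c) && (n != c))).length then
      match invAPList inv (children.filter (fun c => !(E.contains c) && (n != c)))
          (E.insert n (children.filter (fun c => !(E.contains c) && (n != c)))) with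
      | ⟨E', hp⟩ =>
        ⟨E',
         fun k hk => hp.1 k (by rw [PySem.Dict.contains_insert, hk]; simp),
         fun k hk => by
           rcases hp.2 k hk with h | h
           · rw [PySem.Dict.contains_insert] at h
             cases hkn : k == n
             · rw [hkn] at h; simp at h; exact Or.inl h
             · have : k = n := eq_of_beq hkn
               subst this
               exact Or.inr (pv_contains_of_get?_some hg)
           · exact Or.inr h⟩
    else ⟨E, fun _ h => h, fun _ h => Or.inl h⟩
termination_by (pvU inv E, pvW inv E n, 0)
decreasing_by
  cases hc : E.contains n with
  | false => exact Prod.Lex.left _ _ (pvU_insert_lt inv (pv_contains_of_get?_some hg) hc _)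
  | true =>
    rw [pvU_insert_of_contains inv hc]
    refine Prod.Lex.right _ (Prod.Lex.left _ _ ?_)
    rw [pvSumW_filter_insert, pvW, if_pos hc, pvNxt_eq hg]
    omega

def invAPList (inv : PySem.Dict String (List String)) (cs : List String)
    (E : PySem.Dict String (List String)) :
    {E' : PySem.Dict String (List String) // pvMono E E' ∧ pvBnd inv E E'} :=
  match cs with
  | [] => ⟨E, fun _ h => h, fun _ h => Or.inl h⟩
  | c :: cs' =>
    match invAPNode inv c E with
    | ⟨E1, hp1⟩ =>
      match invAPList inv cs' E1 with
      | ⟨E2, hp2⟩ =>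
        ⟨E2,
         fun k hk => hp2.1 k (hp1.1 k hk),
         fun k hk => (hp2.2 k hk).elim (fun h => hp1.2 k h) Or.inr⟩
termination_by (pvU inv E, pvSumW inv E cs, cs.length)
decreasing_by
  · refine Prod.Lex.right _ ?_
    rw [pvSumW_cons]
    rcases Nat.eq_zero_or_pos (pvSumW inv E cs') with h0 | h0
    · rw [h0]
      exact Prod.Lex.right _ (by simp)
    · exact Prod.Lex.left _ _ (by omega)
  · have hle := pvU_mono inv hp1.1
    rcases lt_or_eq_of_le hle with h | h
    · exact Prod.Lex.left _ _ h
    · rw [h]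
      refine Prod.Lex.right _ (Prod.Lex.left _ _ ?_)
      have hceq := pv_contains_eq_of_u_eq inv hp1.1 hp1.2 h
      rw [pvSumW_congr inv hceq, pvSumW_cons]
      have := pvW_pos inv E c
      omega
end

def invocation_py (method_id : String) (explored : List (String × List String)) (invoke_local_methods : List (String × List String)) : List (String × List String) :=
  (invAPNode (PySem.Dict.ofList invoke_local_methods) method_id
    (PySem.Dict.ofList explored)).val.items

-- ===== PORT B =====
-- Source B's while-loop over an explicit stack. Python pops from the END of the list and pushes
-- `stack.extend(reversed(nxt))`; the port keeps the list reversed (top of stack = head), so a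
-- pop is taking the head and that extend is prepending `nxt` — element-for-element the same
-- traversal. The loop is made total by a fuel counter `pvFuel` (a totality guard only: the
-- sufficiency proof below shows the loop always ends with fuel to spare, so the fuel-exhausted
-- arm is never the result).
def pvPick (ex : PySem.Dict String (List String)) (node : String) (cs : List String) :
    List String :=
  cs.foldr (fun c acc => if ex.contains c = false ∧ node ≠ c then c :: acc else acc) []

def pvSize (ms : List (String × List String)) : Nat :=
  ms.foldl (fun a p => a + p.2.length) 0

def pvFuel (ms : List (String × List String)) : Nat :=
  (pvSize ms + 3) * (pvSize ms + 2) ^ ms.length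

def pvRun (inv : PySem.Dict String (List String)) :
    Nat → List String → PySem.Dict String (List String) → PySem.Dict String (List String)
  | 0, _, ex => ex
  | _ + 1, [], ex => ex
  | fuel + 1, node :: rest, ex =>
    if inv.contains node = false then
      pvRun inv fuel rest ex
    else
      let nxt := pvPick ex node (inv.getD node [])
      if nxt.isEmpty then
        pvRun inv fuel rest ex
      else
        pvRun inv fuel (nxt ++ rest) (ex.insert node nxt)

def invocation_py_alt (method_id : String) (explored : List (String × List String)) (invoke_local_methods : List (String × List String)) : List (String × List String) :=
  (pvRun (PySem.Dict.ofList invoke_local_methods) (pvFuel invoke_local_methods)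
    [method_id] (PySem.Dict.ofList explored)).items

-- ===== PRECONDITION & SPEC =====
def Spec_invocation_py (method_id : String) (explored : List (String × List String)) (invoke_local_methods : List (String × List String)) (out : List (String × List String)) : Prop := out = invocation_py_alt method_id explored invoke_local_methods
instance (method_id : String) (explored : List (String × List String)) (invoke_local_methods : List (String × List String)) (out : List (String × List String)) : Decidable (Spec_invocation_py method_id explored invoke_local_methods out) := by unfold Spec_invocation_py; infer_instance

-- ===== CLAIM (what is proved, stated in full; the proofs are below) =====
def Claim_equal_invocation_py : Prop := ∀ (method_id : String) (explored : List (String × List String)) (invoke_local_methods : List (String × List String)), Dom_invocation_py method_id explored invoke_local_methods → Spec_invocation_py method_id explored invoke_local_methods (invocation_py method_id explored invoke_local_methods)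

-- ===== LEMMAS AND PROOFS =====

lemma pvSumW_append (inv E : PySem.Dict String (List String)) (xs ys : List String) :
    pvSumW inv E (xs ++ ys) = pvSumW inv E xs + pvSumW inv E ys := by
  simp [pvSumW]

lemma pv_contains_insert_of_contains {E : PySem.Dict String (List String)} {n : String}
    (h : E.contains n = true) (v : List String) (k : String) :
    (E.insert n v).contains k = E.contains k := by
  rw [PySem.Dict.contains_insert]
  cases hkn : k == n
  · simp
  · have : k = n := eq_of_beq hkn
    subst this
    simp [h]

-- Proof-only middle layer: `invBLoop` is the stack loop WITHOUT fuel (by well-founded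
-- recursion). The proof goes A = invBLoop (pvBridge) and pvRun fuel = invBLoop whenever
-- fuel ≥ the potential (pvRunEnough), then instantiates the fuel bound.
def invBLoop (inv : PySem.Dict String (List String)) (stack : List String)
    (E : PySem.Dict String (List String)) : PySem.Dict String (List String) :=
  match stack with
  | [] => E
  | n :: rest =>
    match hg : inv.get? n with
    | none => invBLoop inv rest E
    | some children =>
      if hnx : 0 < (children.filter (fun c => !(E.contains c) && (n != c))).length then
        invBLoop inv ((children.filter (fun c => !(E.contains c) && (n != c))) ++ rest)
          (E.insert n (children.filter (fun c => !(E.contains c) && (n != c))))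
      else invBLoop inv rest E
termination_by (pvU inv E, pvSumW inv E stack)
decreasing_by
  · exact Prod.Lex.right _ (by rw [pvSumW_cons]; have := pvW_pos inv E n; omega)
  · cases hc : E.contains n with
    | false => exact Prod.Lex.left _ _ (pvU_insert_lt inv (pv_contains_of_get?_some hg) hc _)
    | true =>
      rw [pvU_insert_of_contains inv hc]
      refine Prod.Lex.right _ ?_
      rw [pvSumW_append, pvSumW_filter_insert,
        pvSumW_congr inv (pv_contains_insert_of_contains hc _), pvSumW_cons,
        pvW, if_pos hc, pvNxt_eq hg]
      omega
  · exact Prod.Lex.right _ (by rw [pvSumW_cons]; have := pvW_pos inv E n; omega)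

lemma invBLoop_nil (inv E : PySem.Dict String (List String)) :
    invBLoop inv [] E = E := by
  rw [invBLoop]

lemma invBLoop_cons_none {inv : PySem.Dict String (List String)} {n : String}
    (rest : List String) (E : PySem.Dict String (List String)) (h : inv.get? n = none) :
    invBLoop inv (n :: rest) E = invBLoop inv rest E := by
  rw [invBLoop]
  split
  · rfl
  · next children heq => rw [h] at heq; simp at heq

lemma invBLoop_cons_pos {inv : PySem.Dict String (List String)} {n : String} {ch : List String}
    (rest : List String) {E : PySem.Dict String (List String)} (h : inv.get? n = some ch)
    (hnx : 0 < (ch.filter (fun c => !(E.contains c) && (n != c))).length) :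
    invBLoop inv (n :: rest) E
      = invBLoop inv ((ch.filter (fun c => !(E.contains c) && (n != c))) ++ rest)
          (E.insert n (ch.filter (fun c => !(E.contains c) && (n != c)))) := by
  rw [invBLoop]
  split
  · next heq => rw [h] at heq; simp at heq
  · next children heq =>
      rw [h] at heq
      injection heq with hch
      subst hch
      rw [dif_pos hnx]

lemma invBLoop_cons_zero {inv : PySem.Dict String (List String)} {n : String} {ch : List String}
    (rest : List String) {E : PySem.Dict String (List String)} (h : inv.get? n = some ch)
    (hnx : ¬ 0 < (ch.filter (fun c => !(E.contains c) && (n != c))).length) :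
    invBLoop inv (n :: rest) E = invBLoop inv rest E := by
  rw [invBLoop]
  split
  · next heq => rw [h] at heq
  · next children heq =>
      rw [h] at heq
      injection heq with hch
      subst hch
      rw [dif_neg hnx]

lemma invAPNode_none {inv : PySem.Dict String (List String)} {n : String}
    (E : PySem.Dict String (List String)) (h : inv.get? n = none) :
    (invAPNode inv n E).val = E := by
  rw [invAPNode]
  split
  · rfl
  · next children heq => rw [h] at heq; simp at heq

lemma invAPNode_pos {inv : PySem.Dict String (List String)} {n : String} {ch : List String}
    {E : PySem.Dict String (List String)} (h : inv.get? n = some ch)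
    (hnx : 0 < (ch.filter (fun c => !(E.contains c) && (n != c))).length) :
    (invAPNode inv n E).val
      = (invAPList inv (ch.filter (fun c => !(E.contains c) && (n != c)))
          (E.insert n (ch.filter (fun c => !(E.contains c) && (n != c))))).val := by
  rw [invAPNode]
  split
  · next heq => rw [h] at heq; simp at heq
  · next children heq =>
      rw [h] at heq
      injection heq with hch
      subst hch
      rw [dif_pos hnx]

lemma invAPNode_zero {inv : PySem.Dict String (List String)} {n : String} {ch : List String}
    {E : PySem.Dict String (List String)} (h : inv.get? n = some ch)
    (hnx : ¬ 0 < (ch.filter (fun c => !(E.contains c) && (n != c))).length) :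
    (invAPNode inv n E).val = E := by
  rw [invAPNode]
  split
  · next heq => rw [h] at heq
  · next children heq =>
      rw [h] at heq
      injection heq with hch
      subst hch
      rw [dif_neg hnx]

lemma invAPList_nil (inv E : PySem.Dict String (List String)) :
    (invAPList inv [] E).val = E := by
  rw [invAPList]

lemma invAPList_cons (inv : PySem.Dict String (List String)) (c : String) (cs : List String)
    (E : PySem.Dict String (List String)) :
    (invAPList inv (c :: cs) E).val = (invAPList inv cs (invAPNode inv c E).val).val := by
  rw [invAPList]

-- The bridge: running the stack loop on `cs ++ rest` first runs A's child loop on `cs`,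
-- then continues with `rest` — by strong induction on the lexicographic measure (pvU, pvSumW).
lemma pvBridge (inv : PySem.Dict String (List String)) :
    ∀ (a b : Nat) (cs rest : List String) (E : PySem.Dict String (List String)),
      pvU inv E = a → pvSumW inv E cs = b →
      invBLoop inv (cs ++ rest) E = invBLoop inv rest (invAPList inv cs E).val := by
  intro a
  induction a using Nat.strong_induction_on with
  | _ a ihA =>
    intro b
    induction b using Nat.strong_induction_on with
    | _ b ihB =>
      intro cs rest E ha hb
      cases cs with
      | nil =>
        rw [invAPList_nil]
        rfl
      | cons c cs' =>
        rw [List.cons_append]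
        cases hg : inv.get? c with
        | none =>
          rw [invBLoop_cons_none _ _ hg, invAPList_cons, invAPNode_none _ hg]
          refine ihB (pvSumW inv E cs') ?_ cs' rest E ha rfl
          subst hb
          rw [pvSumW_cons]
          have := pvW_pos inv E c
          omega
        | some ch =>
          by_cases hnx : 0 < (ch.filter (fun x => !(E.contains x) && (c != x))).length
          · rw [invBLoop_cons_pos _ hg hnx]
            have step1 :
                invBLoop inv ((ch.filter (fun x => !(E.contains x) && (c != x))) ++ (cs' ++ rest))
                    (E.insert c (ch.filter (fun x => !(E.contains x) && (c != x))))
                  = invBLoop inv (cs' ++ rest)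
                      (invAPList inv (ch.filter (fun x => !(E.contains x) && (c != x)))
                        (E.insert c (ch.filter (fun x => !(E.contains x) && (c != x))))).val := by
              cases hc : E.contains c with
              | false =>
                refine ihA (pvU inv (E.insert c (ch.filter (fun x => !(E.contains x) && (c != x)))))
                  ?_ _ _ _ _ rfl rfl
                rw [← ha]
                exact pvU_insert_lt inv (pv_contains_of_get?_some hg) hc _
              | true =>
                have hu : pvU inv (E.insert c (ch.filter (fun x => !(E.contains x) && (c != x)))) = a := by
                  rw [pvU_insert_of_contains inv hc]; exact ha
                refine ihB (pvSumW inv (E.insert c (ch.filter (fun x => !(E.contains x) && (c != x))))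
                  (ch.filter (fun x => !(E.contains x) && (c != x)))) ?_ _ _ _ hu rfl
                rw [pvSumW_filter_insert]
                subst hb
                rw [pvSumW_cons, pvW, if_pos hc, pvNxt_eq hg]
                omega
            rw [step1, ← invAPNode_pos hg hnx, invAPList_cons]
            have hm2 := (invAPNode inv c E).2.1
            have hb2 := (invAPNode inv c E).2.2
            have hle := pvU_mono inv hm2
            rcases lt_or_eq_of_le hle with h | h
            · refine ihA (pvU inv (invAPNode inv c E).val) ?_ _ cs' rest _ rfl rfl
              rw [← ha]
              exact h
            · have hceq := pv_contains_eq_of_u_eq inv hm2 hb2 h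
              refine ihB (pvSumW inv (invAPNode inv c E).val cs') ?_ cs' rest _ (by rw [h, ha]) rfl
              rw [pvSumW_congr inv hceq]
              subst hb
              rw [pvSumW_cons]
              have := pvW_pos inv E c
              omega
          · rw [invBLoop_cons_zero _ hg hnx, invAPList_cons, invAPNode_zero hg hnx]
            refine ihB (pvSumW inv E cs') ?_ cs' rest E ha rfl
            subst hb
            rw [pvSumW_cons]
            have := pvW_pos inv E c
            omega

-- pvPick is the same filter invBLoop computes.
lemma pvPick_eq (ex : PySem.Dict String (List String)) (n : String) (cs : List String) :
    pvPick ex n cs = cs.filter (fun c => !(ex.contains c) && (n != c)) := by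
  induction cs with
  | nil => rfl
  | cons c cs' ih =>
    unfold pvPick at ih ⊢
    rw [List.foldr_cons, ih, List.filter_cons]
    by_cases h1 : ex.contains c = false
    · by_cases h2 : n = c
      · simp [h1, h2]
      · simp [h1, h2, bne_iff_ne.mpr h2]
    · have h1' : ex.contains c = true := by simpa using h1
      simp [h1']

-- Weight bounds used by the fuel-sufficiency argument; S bounds every children list.
lemma pvW_le (inv : PySem.Dict String (List String)) (S : Nat)
    (hS : ∀ k ch, inv.get? k = some ch → ch.length ≤ S)
    (E : PySem.Dict String (List String)) (n : String) : pvW inv E n ≤ S + 1 := by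
  unfold pvW
  split
  · unfold pvNxt
    cases hg : inv.get? n with
    | none => simp
    | some ch =>
      have h1 : (ch.filter (fun c => !(E.contains c) && (n != c))).length ≤ ch.length :=
        List.length_filter_le _ _
      have h2 := hS n ch hg
      simp only [Option.getD_some]
      omega
  · omega

lemma pvW_insert_le (inv : PySem.Dict String (List String)) (S : Nat)
    (hS : ∀ k ch, inv.get? k = some ch → ch.length ≤ S)
    (E : PySem.Dict String (List String)) (n : String) (v : List String) (k : String) :
    pvW inv (E.insert n v) k ≤ (S + 1) * pvW inv E k := by
  cases hk : E.contains k with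
  | false =>
    have h := pvW_le inv S hS (E.insert n v) k
    have hE : pvW inv E k = 1 := by rw [pvW, if_neg (by simp [hk])]
    rw [hE]
    omega
  | true =>
    have hk' : (E.insert n v).contains k = true := by
      rw [PySem.Dict.contains_insert, hk]; simp
    rw [pvW, if_pos hk', pvW, if_pos hk]
    have hmono : (pvNxt inv (E.insert n v) k).length ≤ (pvNxt inv E k).length := by
      unfold pvNxt
      rw [← List.countP_eq_length_filter, ← List.countP_eq_length_filter]
      refine List.countP_mono_left ?_
      intro c _ hp
      simp only [Bool.and_eq_true, Bool.not_eq_true'] at hp ⊢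
      refine ⟨?_, hp.2⟩
      have := hp.1
      rw [PySem.Dict.contains_insert] at this
      simp only [Bool.or_eq_false_iff] at this
      exact this.2
    have h1 : 1 + (pvNxt inv (E.insert n v) k).length ≤ 1 + (pvNxt inv E k).length := by omega
    calc 1 + (pvNxt inv (E.insert n v) k).length
        ≤ 1 + (pvNxt inv E k).length := h1
      _ ≤ (S + 1) * (1 + (pvNxt inv E k).length) := Nat.le_mul_of_pos_left _ (by omega)

lemma pvSumW_insert_le (inv : PySem.Dict String (List String)) (S : Nat)
    (hS : ∀ k ch, inv.get? k = some ch → ch.length ≤ S)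
    (E : PySem.Dict String (List String)) (n : String) (v : List String) :
    ∀ l, pvSumW inv (E.insert n v) l ≤ (S + 1) * pvSumW inv E l := by
  intro l
  induction l with
  | nil => simp [pvSumW]
  | cons x xs ih =>
    rw [pvSumW_cons, pvSumW_cons, Nat.mul_add]
    exact Nat.add_le_add (pvW_insert_le inv S hS E n v x) ih

-- Unfolding equations for pvRun.
lemma pvRun_zero (inv : PySem.Dict String (List String)) (st : List String)
    (E : PySem.Dict String (List String)) : pvRun inv 0 st E = E := by
  cases st <;> rfl

lemma pvRun_nil (inv : PySem.Dict String (List String)) (f : Nat)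
    (E : PySem.Dict String (List String)) : pvRun inv (f + 1) [] E = E := rfl

lemma pvRun_cons (inv : PySem.Dict String (List String)) (f : Nat) (n : String)
    (rest : List String) (E : PySem.Dict String (List String)) :
    pvRun inv (f + 1) (n :: rest) E
      = if inv.contains n = false then pvRun inv f rest E
        else
          let nxt := pvPick E n (inv.getD n [])
          if nxt.isEmpty then pvRun inv f rest E
          else pvRun inv f (nxt ++ rest) (E.insert n nxt) := rfl

-- Fuel sufficiency: with fuel ≥ (pvSumW + 1) * (S+2)^pvU the fuelled loop equals invBLoop.
lemma pvRunEnough (inv : PySem.Dict String (List String)) (S : Nat)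
    (hS : ∀ k ch, inv.get? k = some ch → ch.length ≤ S) :
    ∀ fuel stack (E : PySem.Dict String (List String)),
      (pvSumW inv E stack + 1) * (S + 2) ^ (pvU inv E) ≤ fuel →
      pvRun inv fuel stack E = invBLoop inv stack E := by
  intro fuel
  induction fuel using Nat.strong_induction_on with
  | _ fuel ih =>
    intro stack E hfuel
    cases stack with
    | nil =>
      rw [invBLoop_nil]
      cases fuel with
      | zero => exact pvRun_zero _ _ _
      | succ f => exact pvRun_nil _ _ _
    | cons n rest =>
      have hPpos : 0 < (S + 2) ^ (pvU inv E) := pow_pos (by omega : 0 < S + 2) _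
      have hfpos : 0 < fuel := by
        have : 0 < (pvSumW inv E (n :: rest) + 1) * (S + 2) ^ (pvU inv E) :=
          Nat.mul_pos (by omega) hPpos
        omega
      obtain ⟨f, rfl⟩ : ∃ f, fuel = f + 1 := ⟨fuel - 1, by omega⟩
      rw [pvRun_cons]
      -- the "skip" reasoning shared by the continue / empty-nxt arms
      have hskip : (pvSumW inv E rest + 1) * (S + 2) ^ (pvU inv E) ≤ f := by
        have hsplit : pvSumW inv E (n :: rest) = pvW inv E n + pvSumW inv E rest :=
          pvSumW_cons _ _ _ _
        have hw := pvW_pos inv E n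
        have hmul : (pvSumW inv E rest + 1) * (S + 2) ^ (pvU inv E) + 1
            ≤ (pvSumW inv E (n :: rest) + 1) * (S + 2) ^ (pvU inv E) := by
          have : (pvSumW inv E rest + 1) + 1 ≤ pvSumW inv E (n :: rest) + 1 := by omega
          have h2 := Nat.mul_le_mul_right ((S + 2) ^ (pvU inv E)) this
          rw [Nat.add_mul] at h2
          omega
        omega
      cases hc : inv.contains n with
      | false =>
        rw [if_pos rfl]
        have hg : inv.get? n = none := (PySem.Dict.get?_eq_none_iff_contains inv n).mpr hc
        rw [invBLoop_cons_none _ _ hg]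
        exact ih f (by omega) rest E hskip
      | true =>
        rw [if_neg (by simp)]
        cases hg : inv.get? n with
        | none =>
          exact absurd ((PySem.Dict.get?_eq_none_iff_contains inv n).mp hg) (by simp [hc])
        | some ch =>
          have hgd : inv.getD n [] = ch := PySem.Dict.getD_of_get?_eq_some inv [] hg
          simp only [hgd, pvPick_eq]
          set flt := ch.filter (fun c => !(E.contains c) && (n != c)) with hflt
          by_cases hemp : flt.isEmpty
          · rw [if_pos hemp, invBLoop_cons_zero _ hg
              (by rw [← hflt]; simp [List.isEmpty_iff] at hemp; simp [hemp])]
            exact ih f (by omega) rest E hskip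
          · rw [if_neg hemp]
            have hlen : 0 < flt.length := by
              cases hfl : flt with
              | nil => rw [hfl] at hemp; simp at hemp
              | cons a l => simp
            rw [invBLoop_cons_pos _ hg (by rw [← hflt]; exact hlen)]
            refine ih f (by omega) _ _ ?_
            -- potential strictly decreases at an insert step
            have hflen : flt.length ≤ S := le_trans (List.length_filter_le _ _) (hS n ch hg)
            have hsum : pvSumW inv (E.insert n flt) (flt ++ rest)
                = flt.length + pvSumW inv (E.insert n flt) rest := by
              rw [pvSumW_append, hflt, pvSumW_filter_insert]
            cases hEn : E.contains n with
            | true =>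
              -- same pvU level, pvSumW drops by exactly one
              have hu := pvU_insert_of_contains inv hEn flt
              have hrest : pvSumW inv (E.insert n flt) rest = pvSumW inv E rest :=
                pvSumW_congr inv (pv_contains_insert_of_contains hEn flt) rest
              have hwn : pvW inv E n = 1 + flt.length := by
                rw [pvW, if_pos hEn, pvNxt_eq hg]
              have hold : pvSumW inv E (n :: rest) = 1 + flt.length + pvSumW inv E rest := by
                rw [pvSumW_cons, hwn]
              rw [hu, hsum, hrest]
              have : (flt.length + pvSumW inv E rest + 1) * (S + 2) ^ (pvU inv E)
                  + (S + 2) ^ (pvU inv E)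
                  = (pvSumW inv E (n :: rest) + 1) * (S + 2) ^ (pvU inv E) := by
                rw [hold]; ring
              omega
            | false =>
              -- pvU drops; pvSumW may grow but only by the bounded factor
              have hu : pvU inv (E.insert n flt) < pvU inv E := pvU_insert_lt inv hc hEn flt
              have hu1 : 1 ≤ pvU inv E := by omega
              have hwn : pvW inv E n = 1 := by rw [pvW, if_neg (by simp [hEn])]
              have hold : pvSumW inv E (n :: rest) = 1 + pvSumW inv E rest := by
                rw [pvSumW_cons, hwn]
              have hrest : pvSumW inv (E.insert n flt) rest ≤ (S + 1) * pvSumW inv E rest :=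
                pvSumW_insert_le inv S hS E n flt rest
              -- new potential ≤ (S+1)*(old pvSumW + 1) * (S+2)^(pvU-1) < old potential
              have hexp : (S + 2) ^ (pvU inv (E.insert n flt)) ≤ (S + 2) ^ (pvU inv E - 1) :=
                Nat.pow_le_pow_right (by omega) (by omega)
              have hsplit : (S + 2) ^ (pvU inv E) = (S + 2) ^ (pvU inv E - 1) * (S + 2) := by
                conv_lhs => rw [show pvU inv E = (pvU inv E - 1) + 1 by omega]
                rw [Nat.pow_succ]
              set Q := (S + 2) ^ (pvU inv E - 1) with hQ
              have hQpos : 0 < Q := pow_pos (by omega : 0 < S + 2) _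
              set r := pvSumW inv E rest with hr
              have hnew : pvSumW inv (E.insert n flt) (flt ++ rest) + 1
                  ≤ (S + 1) * (r + 1) := by
                rw [hsum]
                have := hrest
                calc flt.length + pvSumW inv (E.insert n flt) rest + 1
                    ≤ S + (S + 1) * r + 1 := by omega
                  _ = (S + 1) * (r + 1) := by ring
              have hstep : (pvSumW inv (E.insert n flt) (flt ++ rest) + 1)
                    * (S + 2) ^ (pvU inv (E.insert n flt))
                  ≤ (S + 1) * (r + 1) * Q := by
                exact Nat.mul_le_mul hnew hexp
              have hbig : (S + 1) * (r + 1) * Q + 1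
                  ≤ (pvSumW inv E (n :: rest) + 1) * (S + 2) ^ (pvU inv E) := by
                rw [hold, hsplit]
                have hx : (1 + r + 1) * (Q * (S + 2))
                    = (S + 1) * (r + 1) * Q + (r + 1) * Q + Q + (S + 1) * Q := by ring
                omega
              omega

-- Facts about ofList needed to instantiate S and the exponent.
lemma pv_foldl_get_bound (S : Nat) :
    ∀ (l : List (String × List String)) (d : PySem.Dict String (List String)),
      (∀ k ch, d.get? k = some ch → ch.length ≤ S) →
      (∀ p ∈ l, p.2.length ≤ S) →
      ∀ k ch, (l.foldl (fun d p => d.insert p.1 p.2) d).get? k = some ch → ch.length ≤ S := by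
  intro l
  induction l with
  | nil => intro d hd _ k ch h; exact hd k ch h
  | cons p l' ih =>
    intro d hd hl k ch h
    refine ih (d.insert p.1 p.2) ?_ (fun q hq => hl q (List.mem_cons_of_mem _ hq)) k ch h
    intro k' ch' h'
    rw [PySem.Dict.get?_insert] at h'
    split at h'
    · injection h' with he
      exact he ▸ hl p List.mem_cons_self
    · exact hd k' ch' h'

lemma pv_size_insert_le (d : PySem.Dict String (List String)) (k : String) (v : List String) :
    (d.insert k v).keys.length ≤ d.keys.length + 1 := by
  simp only [PySem.Dict.keys, List.length_map, PySem.Dict.items_insert]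
  split
  · simp
  · simp

lemma pv_foldl_size :
    ∀ (l : List (String × List String)) (d : PySem.Dict String (List String)),
      (l.foldl (fun d p => d.insert p.1 p.2) d).keys.length ≤ d.keys.length + l.length := by
  intro l
  induction l with
  | nil => intro d; simp
  | cons p l' ih =>
    intro d
    calc (List.foldl (fun d p => d.insert p.1 p.2) (d.insert p.1 p.2) l').keys.length
        ≤ (d.insert p.1 p.2).keys.length + l'.length := ih _
      _ ≤ d.keys.length + 1 + l'.length := by
          have := pv_size_insert_le d p.1 p.2; omega
      _ = d.keys.length + (p :: l').length := by simp; omega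

lemma pv_ofList_eq_foldl (l : List (String × List String)) :
    PySem.Dict.ofList l = l.foldl (fun d p => d.insert p.1 p.2) PySem.Dict.empty := rfl

lemma pv_foldl_shift : ∀ (l : List (String × List String)) (a : Nat),
    l.foldl (fun a p => a + p.2.length) a = a + l.foldl (fun a p => a + p.2.length) 0 := by
  intro l
  induction l with
  | nil => intro a; simp
  | cons q l' ih =>
    intro a
    simp only [List.foldl_cons]
    rw [ih (a + q.2.length), ih (0 + q.2.length)]
    omega

lemma pv_size_mem (l : List (String × List String)) :
    ∀ p ∈ l, p.2.length ≤ pvSize l := by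
  intro p hp
  induction l with
  | nil => cases hp
  | cons q l' ih =>
    have hq : pvSize (q :: l') = q.2.length + pvSize l' := by
      unfold pvSize
      simp only [List.foldl_cons]
      rw [pv_foldl_shift]
      omega
    rcases List.mem_cons.1 hp with rfl | hp'
    · rw [hq]; omega
    · have := ih hp'
      omega

-- ===== VERDICT (by name: the statement is the Claim_ definition above) =====
theorem invocation_py_spec : Claim_equal_invocation_py := by
  intro mid ex invl _
  unfold Spec_invocation_py invocation_py invocation_py_alt
  have hS : ∀ k ch, (PySem.Dict.ofList invl).get? k = some ch → ch.length ≤ pvSize invl := by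
    rw [pv_ofList_eq_foldl]
    exact pv_foldl_get_bound (pvSize invl) invl PySem.Dict.empty
      (by intro k ch h; rw [PySem.Dict.get?_empty] at h; cases h) (pv_size_mem invl)
  have hK : pvU (PySem.Dict.ofList invl) (PySem.Dict.ofList ex) ≤ invl.length := by
    have h1 : pvU (PySem.Dict.ofList invl) (PySem.Dict.ofList ex)
        ≤ (PySem.Dict.ofList invl).keys.length := by unfold pvU; exact List.countP_le_length
    have h2 := pv_foldl_size invl PySem.Dict.empty
    rw [← pv_ofList_eq_foldl] at h2
    simp only [PySem.Dict.keys_empty] at h2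
    simp at h2
    omega
  have hfuel : (pvSumW (PySem.Dict.ofList invl) (PySem.Dict.ofList ex) [mid] + 1)
      * (pvSize invl + 2) ^ (pvU (PySem.Dict.ofList invl) (PySem.Dict.ofList ex))
      ≤ pvFuel invl := by
    have hw : pvSumW (PySem.Dict.ofList invl) (PySem.Dict.ofList ex) [mid]
        = pvW (PySem.Dict.ofList invl) (PySem.Dict.ofList ex) mid := by
      rw [pvSumW_cons]; simp [pvSumW]
    have hwle := pvW_le (PySem.Dict.ofList invl) (pvSize invl) hS (PySem.Dict.ofList ex) mid
    have hexp : (pvSize invl + 2) ^ (pvU (PySem.Dict.ofList invl) (PySem.Dict.ofList ex))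
        ≤ (pvSize invl + 2) ^ invl.length := Nat.pow_le_pow_right (by omega) hK
    unfold pvFuel
    calc (pvSumW (PySem.Dict.ofList invl) (PySem.Dict.ofList ex) [mid] + 1)
          * (pvSize invl + 2) ^ (pvU (PySem.Dict.ofList invl) (PySem.Dict.ofList ex))
        ≤ (pvSize invl + 3) * (pvSize invl + 2) ^ invl.length := by
          refine Nat.mul_le_mul ?_ hexp
          rw [hw]; omega
      _ = (pvSize invl + 3) * (pvSize invl + 2) ^ invl.length := rfl
  rw [pvRunEnough (PySem.Dict.ofList invl) (pvSize invl) hS (pvFuel invl) [mid]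
    (PySem.Dict.ofList ex) hfuel]
  have h2 : invBLoop (PySem.Dict.ofList invl) [mid] (PySem.Dict.ofList ex)
      = (invAPNode (PySem.Dict.ofList invl) mid (PySem.Dict.ofList ex)).val := by
    have h := pvBridge (PySem.Dict.ofList invl)
      (pvU (PySem.Dict.ofList invl) (PySem.Dict.ofList ex))
      (pvSumW (PySem.Dict.ofList invl) (PySem.Dict.ofList ex) [mid])
      [mid] [] (PySem.Dict.ofList ex) rfl rfl
    rw [invBLoop_nil, invAPList_cons, invAPList_nil] at h
    exact h
  rw [h2]
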